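-- pv_equiv track=rewrite | github.com/Rustam-Z/cracking-maang | _google/matrix/matrix_xy.py | bfs
-- ===== SOURCE A (Python) =====
-- from collections import deque
--
-- def bfs(grid):
--     q, visited = deque(), set()
--     dirs = [(1, 0), (-1, 0), (0, 1), (0, -1)]
--
--     # Insert all Xs into the queue
--     for i in range(len(grid)):
--         for j in range(len(grid[0])):
--             if grid[i][j] == 'X':
--                 # (position, distance)
--                 q.append(((i, j), 0))
--                 visited.add((i, j))
--
--     while q:
--         for _ in range(len(q)):
--             (row, col), dist = q.popleft()
--             if grid[row][col] == 'Y':  # We found Y, we return.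
--                 return dist
--
--             for dir in dirs:
--                 new_pos = (new_r, new_c) = row + dir[0], col + dir[1]
--                 if new_r < 0 or new_c < 0 or new_r >= len(grid) or new_c >= len(grid[0]) or new_pos in visited:
--                     continue
--                 q.append((new_pos, dist + 1))
--                 visited.add(new_pos)
--
--     # Can't reach Y
--     return -1
-- ===== SOURCE B (Python) =====
-- def bfs(grid):
--     # Movement is unobstructed, so the BFS distance between two cells is just
--     # the Manhattan distance: answer = min over (X cell, Y cell) pairs.
--     cols = len(grid[0]) if grid else 0
--     xs = [(i, j) for i in range(len(grid)) for j in range(cols) if grid[i][j] == 'X']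
--     ys = [(i, j) for i in range(len(grid)) for j in range(cols) if grid[i][j] == 'Y']
--     if not xs or not ys:
--         return -1
--     return min(abs(xr - yr) + abs(xc - yc) for (xr, xc) in xs for (yr, yc) in ys)
-- ===== Notes on version B (the rewrite author's own statement) =====
-- stated objective: simpler
-- what changed: Replaces the multi-source BFS (queue + visited set) by a closed form: since movement is unobstructed, the grid distance from X to Y is the Manhattan distance, so B just collects the X cells and Y cells in one scan and returns the minimum |dx|+|dy| over pairs (-1 if either set is empty).
import Mathlib
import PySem

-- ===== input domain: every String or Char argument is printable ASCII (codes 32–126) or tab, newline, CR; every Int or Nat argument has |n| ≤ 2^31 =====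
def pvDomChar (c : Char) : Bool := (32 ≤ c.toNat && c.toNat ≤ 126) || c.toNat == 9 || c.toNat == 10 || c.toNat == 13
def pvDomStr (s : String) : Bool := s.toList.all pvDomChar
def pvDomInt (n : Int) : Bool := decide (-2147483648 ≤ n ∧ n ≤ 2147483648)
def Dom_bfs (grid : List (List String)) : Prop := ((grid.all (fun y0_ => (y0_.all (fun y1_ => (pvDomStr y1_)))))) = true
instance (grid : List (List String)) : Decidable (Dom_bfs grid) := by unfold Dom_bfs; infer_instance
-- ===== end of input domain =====

-- B replaces A's multi-source BFS by a closed form: movement is unobstructed, so the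
-- grid distance is the Manhattan distance and the answer is the minimum |dx|+|dy|
-- over (X cell, Y cell) pairs (-1 if either is absent); return value proved equal on Pre_.

-- shared cell accessor: grid[r][c]; exact for the in-range indices both programs use (Pre_ makes all accesses in range)
def pvCell (grid : List (List String)) (r c : Int) : String :=
  PySem.List.pyGetD (PySem.List.pyGetD grid r []) c ""

-- measure used only for termination of A's BFS loop: in-bounds cells not yet visited
def pvCellsAll (R C : Int) : List (Int × Int) :=
  ((List.range R.toNat).product (List.range C.toNat)).map (fun p => ((p.1 : Int), (p.2 : Int)))

def pvUnseen (R C : Int) (v : PySem.Set (Int × Int)) : Nat :=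
  (pvCellsAll R C).filter (fun p => !(v.contains p)) |>.length

lemma pvMem_cellsAll (R C : Int) (p : Int × Int) :
    p ∈ pvCellsAll R C ↔ 0 ≤ p.1 ∧ p.1 < R ∧ 0 ≤ p.2 ∧ p.2 < C := by
  unfold pvCellsAll
  constructor
  · intro h
    obtain ⟨⟨i, j⟩, hm, rfl⟩ := List.mem_map.1 h
    obtain ⟨hi, hj⟩ := List.pair_mem_product.1 hm
    simp only [List.mem_range] at hi hj
    refine ⟨?_, ?_, ?_, ?_⟩ <;> (dsimp only; omega)
  · rintro ⟨h1, h2, h3, h4⟩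
    refine List.mem_map.2 ⟨(p.1.toNat, p.2.toNat), List.pair_mem_product.2 ⟨?_, ?_⟩, ?_⟩
    · simp only [List.mem_range]; omega
    · simp only [List.mem_range]; omega
    · cases p; simp only [Prod.mk.injEq]; constructor <;> omega

lemma pvNodup_cellsAll (R C : Int) : (pvCellsAll R C).Nodup := by
  unfold pvCellsAll
  refine List.Nodup.map ?_ (List.Nodup.product (List.nodup_range) (List.nodup_range))
  intro a b h
  simpa [Prod.ext_iff] using h

lemma pvUnseen_add (R C : Int) (v : PySem.Set (Int × Int)) (p : Int × Int)
    (hb : 0 ≤ p.1 ∧ p.1 < R ∧ 0 ≤ p.2 ∧ p.2 < C) (hnv : ¬ p ∈ v) :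
    pvUnseen R C (PySem.Set.add v p) + 1 = pvUnseen R C v := by
  have hadd : PySem.Set.add v p = v ++ [p] := by simp [PySem.Set.add, PySem.Set.contains, hnv]
  unfold pvUnseen
  rw [hadd]
  have hfilter : (pvCellsAll R C).filter (fun q => !(PySem.Set.contains (v ++ [p]) q))
      = ((pvCellsAll R C).filter (fun q => !(PySem.Set.contains v q))).filter (fun q => !(q == p)) := by
    rw [List.filter_filter]
    apply List.filter_congr
    intro q _
    simp [PySem.Set.contains, Bool.beq_eq_decide_eq]
    exact Bool.and_comm _ _
  rw [hfilter]
  have hl : ((pvCellsAll R C).filter (fun q => !(PySem.Set.contains v q))).Nodup :=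
    (pvNodup_cellsAll R C).filter _
  have hp : p ∈ (pvCellsAll R C).filter (fun q => !(PySem.Set.contains v q)) :=
    List.mem_filter.2 ⟨(pvMem_cellsAll R C p).2 hb, by simp [PySem.Set.contains, hnv]⟩
  have he : ((pvCellsAll R C).filter (fun q => !(PySem.Set.contains v q))).filter (fun q => !(q == p))
      = ((pvCellsAll R C).filter (fun q => !(PySem.Set.contains v q))).erase p := by
    rw [hl.erase_eq_filter]
    apply List.filter_congr
    intro q _
    simp [bne, Bool.beq_eq_decide_eq]
  rw [he, List.length_erase_of_mem hp]
  have := List.length_pos_of_mem hp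
  omega

-- generic facts about folds, used only to justify termination of the loops
lemma pvFoldl_measure {σ α : Type} (m : σ → Nat) (f : σ → α → σ) (l : List α) (st : σ)
    (h : ∀ st a, m (f st a) = m st) : m (l.foldl f st) = m st := by
  induction l generalizing st with
  | nil => rfl
  | cons a l ih => rw [List.foldl_cons, ih, h]

lemma pvFoldl_le {σ α : Type} (m : σ → Nat) (f : σ → α → σ) (l : List α) (st : σ)
    (h : ∀ st a, m st ≤ m (f st a)) : m st ≤ m (l.foldl f st) := by
  induction l generalizing st with
  | nil => exact le_refl _
  | cons a l ih => exact le_trans (h st a) (ih _)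

-- ===== PORT A =====
def pvDirsA : List (Int × Int) := [(1, 0), (-1, 0), (0, 1), (0, -1)]

-- body of A's inner 'for dir in dirs' loop
def pvStepA (R C : Int) (row col dist : Int)
    (st : List ((Int × Int) × Int) × PySem.Set (Int × Int)) (dir : Int × Int) :
    List ((Int × Int) × Int) × PySem.Set (Int × Int) :=
  if row + dir.1 < 0 ∨ col + dir.2 < 0 ∨ R ≤ row + dir.1 ∨ C ≤ col + dir.2
      ∨ (row + dir.1, col + dir.2) ∈ st.2 then st
  else (st.1 ++ [((row + dir.1, col + dir.2), dist + 1)],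
        PySem.Set.add st.2 (row + dir.1, col + dir.2))

-- A's initial double loop collecting the 'X' cells into the queue (distance 0) and visited
def pvInitA (grid : List (List String)) :
    List ((Int × Int) × Int) × PySem.Set (Int × Int) :=
  (PySem.List.pyRange 0 (PySem.List.len grid) 1).foldl (fun st i =>
    (PySem.List.pyRange 0 (PySem.List.len (PySem.List.pyGetD grid 0 [])) 1).foldl (fun st j =>
      if pvCell grid i j == "X" then (st.1 ++ [((i, j), (0 : Int))], PySem.Set.add st.2 (i, j))
      else st) st) ([], PySem.Set.empty)

-- A's 'for _ in range(len(q))' pass: n pops from the front ('[] case' is an unreachable totality guard: n ≤ len q throughout)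
def pvInnerA (grid : List (List String)) (R C : Int) :
    Nat → List ((Int × Int) × Int) → PySem.Set (Int × Int) →
    Sum Int (List ((Int × Int) × Int) × PySem.Set (Int × Int))
  | 0, q, v => .inr (q, v)
  | _ + 1, [], v => .inr ([], v)
  | n + 1, ((row, col), dist) :: rest, v =>
    if pvCell grid row col == "Y" then .inl dist
    else
      let st := pvDirsA.foldl (pvStepA R C row col dist) (rest, v)
      pvInnerA grid R C n st.1 st.2

lemma pvStepA_measure (R C row col dist : Int) (st) (dir : Int × Int) :
    pvUnseen R C (pvStepA R C row col dist st dir).2 + (pvStepA R C row col dist st dir).1.length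
      = pvUnseen R C st.2 + st.1.length := by
  unfold pvStepA
  split
  · rfl
  · next h =>
    push Not at h
    obtain ⟨h1, h2, h3, h4, h5⟩ := h
    simp only [List.length_append, List.length_singleton]
    rw [← pvUnseen_add R C st.2 _ ⟨by omega, by omega, by omega, by omega⟩ h5]
    omega

lemma pvStepA_le (R C row col dist : Int) (st) (dir : Int × Int) :
    st.1.length ≤ (pvStepA R C row col dist st dir).1.length := by
  unfold pvStepA
  split
  · exact le_refl _
  · simp

lemma pvInnerA_measure (grid : List (List String)) (R C : Int) :
    ∀ (n : Nat) (q : List ((Int × Int) × Int)) (v : PySem.Set (Int × Int)),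
      n ≤ q.length → ∀ st', pvInnerA grid R C n q v = .inr st' →
      pvUnseen R C st'.2 + st'.1.length + n = pvUnseen R C v + q.length := by
  intro n
  induction n with
  | zero =>
    intro q v _ st' h
    simp only [pvInnerA, Sum.inr.injEq] at h
    subst h
    simp
  | succ n ih =>
    intro q v hle st' h
    match q with
    | [] => simp at hle
    | ((row, col), dist) :: rest =>
      simp only [pvInnerA] at h
      by_cases hy : (pvCell grid row col == "Y") = true
      · rw [if_pos hy] at h; exact absurd h (by simp)
      · rw [if_neg hy] at h
        have hm := pvFoldl_measure (fun st => pvUnseen R C st.2 + st.1.length)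
          (pvStepA R C row col dist) pvDirsA (rest, v)
          (pvStepA_measure R C row col dist)
        have hlen := pvFoldl_le (fun st => st.1.length)
          (pvStepA R C row col dist) pvDirsA (rest, v)
          (fun st dir => pvStepA_le R C row col dist st dir)
        have hrec := ih (pvDirsA.foldl (pvStepA R C row col dist) (rest, v)).1
          (pvDirsA.foldl (pvStepA R C row col dist) (rest, v)).2
          (by simp only [List.length_cons] at hle; simp only at hlen; omega) st' h
        simp only [List.length_cons] at *
        omega

def pvOuterA (grid : List (List String)) (R C : Int)
    (q : List ((Int × Int) × Int)) (v : PySem.Set (Int × Int)) : Int :=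
  if hq : q.isEmpty then -1
  else
    match hi : pvInnerA grid R C q.length q v with
    | .inl d => d
    | .inr st => pvOuterA grid R C st.1 st.2
termination_by pvUnseen R C v + q.length
decreasing_by
  have hm := pvInnerA_measure grid R C q.length q v (le_refl _) st hi
  have : q.length ≠ 0 := by simpa [List.isEmpty_iff, List.length_eq_zero_iff] using hq
  omega

def bfs (grid : List (List String)) : Int :=
  let R := PySem.List.len grid
  let C := PySem.List.len (PySem.List.pyGetD grid 0 [])
  let init := pvInitA grid
  pvOuterA grid R C init.1 init.2

-- ===== PORT B =====
-- the comprehension [(i, j) for i in range(R) for j in range(C) if grid[i][j] == t]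
def pvCellsOf (grid : List (List String)) (R C : Int) (t : String) : List (Int × Int) :=
  (PySem.List.pyRange 0 R 1).flatMap (fun i =>
    ((PySem.List.pyRange 0 C 1).filter (fun j => pvCell grid i j == t)).map (fun j => (i, j)))

-- B's tail: -1 if either list is empty, else min of |dx|+|dy| over pairs
-- (the 'none' branch is an unreachable totality guard: the pair list is nonempty there)
def pvAns (xs ys : List (Int × Int)) : Int :=
  if xs.isEmpty ∨ ys.isEmpty then -1
  else
    match PySem.List.min? (xs.flatMap (fun x => ys.map (fun y =>
        (((x.1 - y.1).natAbs : Int) + ((x.2 - y.2).natAbs : Int))))) (fun v => v) with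
    | some m => m
    | none => -1

def bfs_alt (grid : List (List String)) : Int :=
  let cols : Int := if grid.isEmpty then 0 else PySem.List.len (PySem.List.pyGetD grid 0 [])
  pvAns (pvCellsOf grid (PySem.List.len grid) cols "X")
        (pvCellsOf grid (PySem.List.len grid) cols "Y")

-- ===== PRECONDITION & SPEC =====
-- Pre_ excludes exactly the ragged grids having a row shorter than row 0, on which A's
-- grid[i][j] scan raises IndexError (on everything else A returns normally).
def Pre_bfs (grid : List (List String)) : Prop :=
  ∀ row ∈ grid, (grid.headD []).length ≤ row.length
instance (grid : List (List String)) : Decidable (Pre_bfs grid) := by unfold Pre_bfs; infer_instance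

def pvWitness_bfs : List (List String) := [["X", "."], [".", "Y"]]

def Spec_bfs (grid : List (List String)) (out : Int) : Prop := out = bfs_alt grid
instance (grid : List (List String)) (out : Int) : Decidable (Spec_bfs grid out) := by unfold Spec_bfs; infer_instance

-- ===== CLAIM (what is proved, stated in full; the proofs are below) =====
def Claim_equal_bfs : Prop := ∀ (grid : List (List String)), Dom_bfs grid → Pre_bfs grid → Spec_bfs grid (bfs grid)

-- ===== LEMMAS AND PROOFS =====

-- A layered mirror of A's BFS, used only as a stepping stone of the proof:
-- bfs = run of pvLoopB (first half), and pvLoopB computes the Manhattan minimum (second half).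
def pvNbrs (p : Int × Int) : List (Int × Int) :=
  [(p.1 + 1, p.2), (p.1 - 1, p.2), (p.1, p.2 + 1), (p.1, p.2 - 1)]

def pvStepB (R C : Int) (st : List (Int × Int) × PySem.Set (Int × Int)) (q : Int × Int) :
    List (Int × Int) × PySem.Set (Int × Int) :=
  if 0 ≤ q.1 ∧ q.1 < R ∧ 0 ≤ q.2 ∧ q.2 < C ∧ ¬ q ∈ st.2 then
    (st.1 ++ [q], PySem.Set.add st.2 q)
  else st

def pvInitB (grid : List (List String)) (R C : Int) :
    List (Int × Int) × PySem.Set (Int × Int) :=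
  (PySem.List.pyRange 0 R 1).foldl (fun st i =>
    (PySem.List.pyRange 0 C 1).foldl (fun st j =>
      if pvCell grid i j == "X" then (st.1 ++ [(i, j)], PySem.Set.add st.2 (i, j))
      else st) st) ([], PySem.Set.empty)

lemma pvStepB_measure (R C : Int) (st) (q : Int × Int) :
    pvUnseen R C (pvStepB R C st q).2 + (pvStepB R C st q).1.length
      = pvUnseen R C st.2 + st.1.length := by
  unfold pvStepB
  split
  · next h =>
    simp only [List.length_append, List.length_singleton]
    rw [← pvUnseen_add R C st.2 q ⟨h.1, h.2.1, h.2.2.1, h.2.2.2.1⟩ h.2.2.2.2]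
    omega
  · rfl

def pvLoopB (grid : List (List String)) (R C : Int)
    (frontier : List (Int × Int)) (v : PySem.Set (Int × Int)) (depth : Int) : Int :=
  if frontier.isEmpty then -1
  else if frontier.any (fun p => pvCell grid p.1 p.2 == "Y") then depth
  else
    let st := frontier.foldl (fun st p => (pvNbrs p).foldl (pvStepB R C) st) ([], v)
    pvLoopB grid R C st.1 st.2 (depth + 1)
termination_by pvUnseen R C v + frontier.length
decreasing_by
  rw [List.foldl_attach (f := fun (st : List (Int × Int) × PySem.Set (Int × Int)) p =>
        (pvNbrs p).foldl (pvStepB R C) st)]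
  have hm := pvFoldl_measure (fun st => pvUnseen R C st.2 + st.1.length)
    (fun st p => (pvNbrs p).foldl (pvStepB R C) st) frontier ([], v)
    (fun st p => pvFoldl_measure (fun st => pvUnseen R C st.2 + st.1.length)
      (pvStepB R C) (pvNbrs p) st (pvStepB_measure R C))
  have hf : frontier.length ≠ 0 := by
    simpa [List.isEmpty_iff, List.length_eq_zero_iff] using ‹¬ frontier.isEmpty = true›
  simp only [List.length_nil] at hm ⊢
  omega

-- ---- first half: bfs = run of pvLoopB ----

lemma pvStep_rel (R C row col d : Int) (rest : List ((Int × Int) × Int))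
    (acc : List (Int × Int)) (v : PySem.Set (Int × Int)) (dir : Int × Int) :
    pvStepA R C row col d (rest ++ acc.map (fun p => (p, d + 1)), v) dir
      = (rest ++ (pvStepB R C (acc, v) (row + dir.1, col + dir.2)).1.map (fun p => (p, d + 1)),
         (pvStepB R C (acc, v) (row + dir.1, col + dir.2)).2) := by
  unfold pvStepA pvStepB
  split_ifs with h1 h2 h3
  · exfalso
    rcases h1 with h | h | h | h | h
    · omega
    · omega
    · omega
    · omega
    · exact h2.2.2.2.2 h
  · rfl
  · simp [List.map_append]
  · exfalso
    rw [not_or, not_or, not_or, not_or] at h1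
    exact h3 ⟨by omega, by omega, by omega, by omega, h1.2.2.2.2⟩

lemma pvExpand_rel_aux (R C row col d : Int) (l : List (Int × Int)) :
    ∀ (rest : List ((Int × Int) × Int)) (acc : List (Int × Int)) (v : PySem.Set (Int × Int)),
      l.foldl (pvStepA R C row col d) (rest ++ acc.map (fun p => (p, d + 1)), v)
        = (rest ++ (l.foldl (fun st dir => pvStepB R C st (row + dir.1, col + dir.2)) (acc, v)).1.map
              (fun p => (p, d + 1)),
           (l.foldl (fun st dir => pvStepB R C st (row + dir.1, col + dir.2)) (acc, v)).2) := by
  induction l with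
  | nil => intro rest acc v; rfl
  | cons dir l ih =>
    intro rest acc v
    rw [List.foldl_cons, List.foldl_cons, pvStep_rel]
    rcases hst : pvStepB R C (acc, v) (row + dir.1, col + dir.2) with ⟨acc', v'⟩
    exact ih rest acc' v'

lemma pvExpand_rel (R C row col d : Int) (rest : List ((Int × Int) × Int))
    (acc : List (Int × Int)) (v : PySem.Set (Int × Int)) :
    pvDirsA.foldl (pvStepA R C row col d) (rest ++ acc.map (fun p => (p, d + 1)), v)
      = (rest ++ ((pvNbrs (row, col)).foldl (pvStepB R C) (acc, v)).1.map (fun p => (p, d + 1)),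
         ((pvNbrs (row, col)).foldl (pvStepB R C) (acc, v)).2) := by
  have hnb : pvNbrs (row, col) = pvDirsA.map (fun dir => (row + dir.1, col + dir.2)) := by
    simp [pvNbrs, pvDirsA]
    omega
  rw [hnb, List.foldl_map]
  exact pvExpand_rel_aux R C row col d pvDirsA rest acc v

lemma pvLayer (grid : List (List String)) (R C d : Int) :
    ∀ (layer acc : List (Int × Int)) (v : PySem.Set (Int × Int)),
      pvInnerA grid R C layer.length
          (layer.map (fun p => (p, d)) ++ acc.map (fun p => (p, d + 1))) v
        = if layer.any (fun p => pvCell grid p.1 p.2 == "Y") then .inl d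
          else .inr
            ((layer.foldl (fun st p => (pvNbrs p).foldl (pvStepB R C) st) (acc, v)).1.map
                (fun p => (p, d + 1)),
             (layer.foldl (fun st p => (pvNbrs p).foldl (pvStepB R C) st) (acc, v)).2) := by
  intro layer
  induction layer with
  | nil => intro acc v; simp [pvInnerA]
  | cons p rest ih =>
    intro acc v
    rcases p with ⟨row, col⟩
    by_cases hy : (pvCell grid row col == "Y") = true
    · simp [pvInnerA, hy]
    · simp only [List.length_cons, List.map_cons, List.cons_append, List.any_cons]
      rw [pvInnerA, if_neg hy,
        pvExpand_rel R C row col d (rest.map (fun p => (p, d))) acc v]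
      dsimp only
      rw [ih ((pvNbrs (row, col)).foldl (pvStepB R C) (acc, v)).1
          ((pvNbrs (row, col)).foldl (pvStepB R C) (acc, v)).2]
      have hy' : (pvCell grid row col == "Y") = false := by simpa using hy
      simp only [hy', Bool.false_or, Prod.mk.eta, List.foldl_cons]

theorem pvMain (grid : List (List String)) (R C : Int) :
    ∀ (frontier : List (Int × Int)) (v : PySem.Set (Int × Int)) (depth : Int),
      pvOuterA grid R C (frontier.map (fun p => (p, depth))) v = pvLoopB grid R C frontier v depth := by
  intro frontier v depth
  fun_induction pvLoopB grid R C frontier v depth with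
  | case1 frontier v depth hemp =>
    rw [pvOuterA]
    have : frontier = [] := by simpa [List.isEmpty_iff] using hemp
    subst this
    simp
  | case2 frontier v depth hemp hy =>
    have hl := pvLayer grid R C depth frontier [] v
    simp only [List.map_nil, List.append_nil] at hl
    rw [if_pos hy] at hl
    rw [pvOuterA, dif_neg (by simpa [List.isEmpty_iff] using hemp)]
    split
    · next d' hi =>
      rw [List.length_map, hl] at hi
      injection hi with h
      exact h.symm
    · next st2 hi =>
      rw [List.length_map, hl] at hi
      exact absurd hi (by simp)
  | case3 frontier v depth hemp hy st ih =>
    have hl := pvLayer grid R C depth frontier [] v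
    simp only [List.map_nil, List.append_nil] at hl
    rw [if_neg hy] at hl
    have hst : st = List.foldl (fun st p => List.foldl (pvStepB R C) st (pvNbrs p)) ([], v) frontier :=
      List.foldl_attach (f := fun st p => List.foldl (pvStepB R C) st (pvNbrs p))
    rw [pvOuterA, dif_neg (by simpa [List.isEmpty_iff] using hemp)]
    split
    · next d' hi =>
      rw [List.length_map, hl] at hi
      exact absurd hi (by simp)
    · next st2 hi =>
      rw [List.length_map, hl] at hi
      injection hi with h
      subst h
      rw [hst] at ih
      dsimp only
      exact ih

lemma pvInit_rel (grid : List (List String)) :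
    pvInitA grid
      = ((pvInitB grid (PySem.List.len grid) (PySem.List.len (PySem.List.pyGetD grid 0 []))).1.map
            (fun p => (p, (0 : Int))),
         (pvInitB grid (PySem.List.len grid) (PySem.List.len (PySem.List.pyGetD grid 0 []))).2) := by
  unfold pvInitA pvInitB
  refine (List.foldl_hom
    (f := fun st : List (Int × Int) × PySem.Set (Int × Int) =>
      (st.1.map (fun p => (p, (0 : Int))), st.2))
    (g₁ := fun st i =>
      (PySem.List.pyRange 0 (PySem.List.len (PySem.List.pyGetD grid 0 [])) 1).foldl
        (fun st j => if (pvCell grid i j == "X") = true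
          then (st.1 ++ [(i, j)], st.2.add (i, j)) else st) st)
    (g₂ := fun st i =>
      (PySem.List.pyRange 0 (PySem.List.len (PySem.List.pyGetD grid 0 [])) 1).foldl
        (fun st j => if (pvCell grid i j == "X") = true
          then (st.1 ++ [((i, j), (0 : Int))], st.2.add (i, j)) else st) st)
    (l := PySem.List.pyRange 0 (PySem.List.len grid) 1)
    (init := ([], PySem.Set.empty)) ?_)
  intro st i
  refine (List.foldl_hom
    (f := fun st : List (Int × Int) × PySem.Set (Int × Int) =>
      (st.1.map (fun p => (p, (0 : Int))), st.2))
    (g₁ := fun st j => if (pvCell grid i j == "X") = true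
      then (st.1 ++ [(i, j)], st.2.add (i, j)) else st)
    (g₂ := fun st j => if (pvCell grid i j == "X") = true
      then (st.1 ++ [((i, j), (0 : Int))], st.2.add (i, j)) else st)
    (init := st) ?_)
  intro st j
  by_cases hx : (pvCell grid i j == "X") = true
  · simp [hx]
  · simp [hx]

-- ---- second half: pvLoopB computes the Manhattan minimum ----

def pvRect (R C : Int) (q : Int × Int) : Prop :=
  0 ≤ q.1 ∧ q.1 < R ∧ 0 ≤ q.2 ∧ q.2 < C

def pvMan (p q : Int × Int) : Nat := (p.1 - q.1).natAbs + (p.2 - q.2).natAbs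

def pvMdist (xs : List (Int × Int)) (q : Int × Int) : Nat :=
  (PySem.List.min? (xs.map (pvMan q)) (fun v => v)).getD 0

lemma pvMdist_le {xs : List (Int × Int)} {s : Int × Int} (q : Int × Int) (hs : s ∈ xs) :
    pvMdist xs q ≤ pvMan q s := by
  unfold pvMdist
  cases h : PySem.List.min? (xs.map (pvMan q)) (fun v => v) with
  | none =>
    have := (PySem.List.min?_eq_none_iff (xs.map (pvMan q)) (fun v => v)).1 h
    rw [List.map_eq_nil_iff] at this
    exact absurd this (List.ne_nil_of_mem hs)
  | some m =>
    simpa using PySem.List.min?_isMin h (pvMan q s) (List.mem_map_of_mem hs)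

lemma pvMdist_exists {xs : List (Int × Int)} (hxs : xs ≠ []) (q : Int × Int) :
    ∃ s ∈ xs, pvMdist xs q = pvMan q s := by
  unfold pvMdist
  cases h : PySem.List.min? (xs.map (pvMan q)) (fun v => v) with
  | none =>
    have := (PySem.List.min?_eq_none_iff (xs.map (pvMan q)) (fun v => v)).1 h
    rw [List.map_eq_nil_iff] at this
    exact absurd this hxs
  | some m =>
    obtain ⟨s, hs, heq⟩ := List.mem_map.1 (PySem.List.min?_mem h)
    exact ⟨s, hs, by simp [heq]⟩

lemma pvMan_nbr {p q : Int × Int} (s : Int × Int) (h : q ∈ pvNbrs p) :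
    pvMan q s ≤ pvMan p s + 1 := by
  simp only [pvNbrs, List.mem_cons, List.not_mem_nil, or_false] at h
  rcases h with rfl | rfl | rfl | rfl <;> (unfold pvMan; dsimp only; omega)

lemma pvMdist_nbr {xs : List (Int × Int)} (hxs : xs ≠ []) {p q : Int × Int}
    (h : q ∈ pvNbrs p) : pvMdist xs q ≤ pvMdist xs p + 1 := by
  obtain ⟨s, hs, heq⟩ := pvMdist_exists hxs p
  calc pvMdist xs q ≤ pvMan q s := pvMdist_le q hs
    _ ≤ pvMan p s + 1 := pvMan_nbr s h
    _ = pvMdist xs p + 1 := by rw [heq]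

lemma pvMdist_zero {xs : List (Int × Int)} (hxs : xs ≠ []) (q : Int × Int) :
    pvMdist xs q = 0 ↔ q ∈ xs := by
  constructor
  · intro h0
    obtain ⟨s, hs, heq⟩ := pvMdist_exists hxs q
    have hman : pvMan q s = 0 := by omega
    have : q = s := by
      rcases q with ⟨a, b⟩; rcases s with ⟨c, e⟩
      unfold pvMan at hman; dsimp only at hman
      simp only [Prod.mk.injEq]
      omega
    rwa [this]
  · intro hq
    have h1 := pvMdist_le q hq
    have h2 : pvMan q q = 0 := by unfold pvMan; omega
    omega

lemma pvDescend {R C : Int} {xs : List (Int × Int)} (hxs : xs ≠ [])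
    (hsub : ∀ s ∈ xs, pvRect R C s) {q : Int × Int} (hq : pvRect R C q) {d : Nat}
    (hd : pvMdist xs q = d + 1) :
    ∃ p, pvRect R C p ∧ q ∈ pvNbrs p ∧ pvMdist xs p = d := by
  obtain ⟨s, hs, heq⟩ := pvMdist_exists hxs q
  have hman : pvMan q s = d + 1 := by omega
  have hsr := hsub s hs
  rcases q with ⟨a, b⟩; rcases s with ⟨c, e⟩
  unfold pvMan at hman; dsimp only at hman
  unfold pvRect at hq hsr ⊢; dsimp only at hq hsr ⊢
  have hstep : ∀ p : Int × Int, pvRect R C p → ((a, b) : Int × Int) ∈ pvNbrs p →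
      pvMan p (c, e) = d → ∃ p, (0 ≤ p.1 ∧ p.1 < R ∧ 0 ≤ p.2 ∧ p.2 < C) ∧
        ((a, b) : Int × Int) ∈ pvNbrs p ∧ pvMdist xs p = d := by
    intro p hpr hpn hpm
    have hle : pvMdist xs p ≤ d := by
      have := pvMdist_le p hs
      omega
    have hge := pvMdist_nbr hxs hpn
    exact ⟨p, hpr, hpn, by omega⟩
  by_cases hac : a < c
  · refine hstep (a + 1, b) ⟨by omega, by omega, by omega, by omega⟩ ?_ ?_
    · simp [pvNbrs]
    · unfold pvMan; dsimp only; omega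
  · by_cases hca : c < a
    · refine hstep (a - 1, b) ⟨by omega, by omega, by omega, by omega⟩ ?_ ?_
      · simp [pvNbrs]
      · unfold pvMan; dsimp only; omega
    · by_cases hbe : b < e
      · refine hstep (a, b + 1) ⟨by omega, by omega, by omega, by omega⟩ ?_ ?_
        · simp [pvNbrs]
        · unfold pvMan; dsimp only; omega
      · refine hstep (a, b - 1) ⟨by omega, by omega, by omega, by omega⟩ ?_ ?_
        · simp [pvNbrs]
        · unfold pvMan; dsimp only; omega

lemma pvReach {R C : Int} {xs : List (Int × Int)} (hxs : xs ≠ [])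
    (hsub : ∀ s ∈ xs, pvRect R C s) :
    ∀ (n : Nat) (q : Int × Int), pvRect R C q → pvMdist xs q = n →
      ∀ k ≤ n, ∃ p, pvRect R C p ∧ pvMdist xs p = k := by
  intro n
  induction n with
  | zero =>
    intro q hq h0 k hk
    exact ⟨q, hq, by omega⟩
  | succ n ih =>
    intro q hq hn k hk
    by_cases hk' : k = n + 1
    · exact ⟨q, hq, by omega⟩
    · obtain ⟨p, hpr, _, hpd⟩ := pvDescend hxs hsub hq hn
      exact ih p hpr hpd k (by omega)

lemma pvMem_cellsOf (grid : List (List String)) (R C : Int) (t : String) (q : Int × Int) :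
    q ∈ pvCellsOf grid R C t ↔ pvRect R C q ∧ pvCell grid q.1 q.2 = t := by
  unfold pvCellsOf pvRect
  simp only [List.mem_flatMap, List.mem_map, List.mem_filter, PySem.List.mem_pyRange_one,
    beq_iff_eq]
  constructor
  · rintro ⟨i, hi, j, ⟨hj, hc⟩, rfl⟩
    exact ⟨⟨hi.1, hi.2, hj.1, hj.2⟩, hc⟩
  · rintro ⟨⟨h1, h2, h3, h4⟩, hc⟩
    exact ⟨q.1, ⟨h1, h2⟩, q.2, ⟨⟨h3, h4⟩, hc⟩, rfl⟩

lemma pvStepB_foldl_mem (R C : Int) :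
    ∀ (l acc : List (Int × Int)) (v : PySem.Set (Int × Int)), (∀ q ∈ acc, q ∈ v) →
      ∀ q : Int × Int,
        (q ∈ (l.foldl (pvStepB R C) (acc, v)).1 ↔ q ∈ acc ∨ (q ∈ l ∧ pvRect R C q ∧ ¬ q ∈ v)) ∧
        (q ∈ (l.foldl (pvStepB R C) (acc, v)).2 ↔ q ∈ v ∨ (q ∈ l ∧ pvRect R C q)) := by
  intro l
  induction l with
  | nil => intro acc v h q; simp
  | cons x l ih =>
    intro acc v h q
    rw [List.foldl_cons]
    by_cases hc : 0 ≤ x.1 ∧ x.1 < R ∧ 0 ≤ x.2 ∧ x.2 < C ∧ ¬ x ∈ v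
    · have hstep : pvStepB R C (acc, v) x = (acc ++ [x], PySem.Set.add v x) := by
        unfold pvStepB; dsimp only; rw [if_pos hc]
      rw [hstep]
      have h' : ∀ q ∈ acc ++ [x], q ∈ PySem.Set.add v x := by
        intro q hq
        rcases List.mem_append.1 hq with hq | hq
        · exact (PySem.Set.mem_add v x q).2 (Or.inl (h q hq))
        · exact (PySem.Set.mem_add v x q).2 (Or.inr (List.mem_singleton.1 hq))
      have hxr : pvRect R C x := ⟨hc.1, hc.2.1, hc.2.2.1, hc.2.2.2.1⟩
      have hxv : ¬ x ∈ v := hc.2.2.2.2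
      obtain ⟨ih1, ih2⟩ := ih (acc ++ [x]) (PySem.Set.add v x) h' q
      constructor
      · rw [ih1]
        constructor
        · rintro (hm | ⟨hl, hr, hnv⟩)
          · rcases List.mem_append.1 hm with hm | hm
            · exact Or.inl hm
            · have hqx := List.mem_singleton.1 hm
              subst hqx
              exact Or.inr ⟨List.mem_cons.2 (Or.inl rfl), hxr, hxv⟩
          · exact Or.inr ⟨List.mem_cons.2 (Or.inr hl), hr,
              fun hv => hnv ((PySem.Set.mem_add v x q).2 (Or.inl hv))⟩
        · rintro (hm | ⟨hl, hr, hnv⟩)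
          · exact Or.inl (List.mem_append.2 (Or.inl hm))
          · by_cases hqx : q = x
            · subst hqx
              exact Or.inl (List.mem_append.2 (Or.inr (List.mem_singleton.2 rfl)))
            · rcases List.mem_cons.1 hl with h1 | h1
              · exact absurd h1 hqx
              · refine Or.inr ⟨h1, hr, fun hv => ?_⟩
                rcases (PySem.Set.mem_add v x q).1 hv with h2 | h2
                · exact hnv h2
                · exact hqx h2
      · rw [ih2]
        constructor
        · rintro (hm | ⟨hl, hr⟩)
          · rcases (PySem.Set.mem_add v x q).1 hm with h2 | h2
            · exact Or.inl h2
            · subst h2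
              exact Or.inr ⟨List.mem_cons.2 (Or.inl rfl), hxr⟩
          · exact Or.inr ⟨List.mem_cons.2 (Or.inr hl), hr⟩
        · rintro (hm | ⟨hl, hr⟩)
          · exact Or.inl ((PySem.Set.mem_add v x q).2 (Or.inl hm))
          · rcases List.mem_cons.1 hl with h1 | h1
            · exact Or.inl ((PySem.Set.mem_add v x q).2 (Or.inr h1))
            · exact Or.inr ⟨h1, hr⟩
    · have hstep : pvStepB R C (acc, v) x = (acc, v) := by
        unfold pvStepB; dsimp only; rw [if_neg hc]
      rw [hstep]
      have hx : pvRect R C x → x ∈ v := by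
        intro hr
        by_contra hv
        exact hc ⟨hr.1, hr.2.1, hr.2.2.1, hr.2.2.2, hv⟩
      obtain ⟨ih1, ih2⟩ := ih acc v h q
      constructor
      · rw [ih1]
        constructor
        · rintro (hm | ⟨hl, hr, hnv⟩)
          · exact Or.inl hm
          · exact Or.inr ⟨List.mem_cons.2 (Or.inr hl), hr, hnv⟩
        · rintro (hm | ⟨hl, hr, hnv⟩)
          · exact Or.inl hm
          · rcases List.mem_cons.1 hl with h1 | h1
            · exact absurd (h1 ▸ hx (h1 ▸ hr)) (h1 ▸ hnv)
            · exact Or.inr ⟨h1, hr, hnv⟩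
      · rw [ih2]
        constructor
        · rintro (hm | ⟨hl, hr⟩)
          · exact Or.inl hm
          · exact Or.inr ⟨List.mem_cons.2 (Or.inr hl), hr⟩
        · rintro (hm | ⟨hl, hr⟩)
          · exact Or.inl hm
          · rcases List.mem_cons.1 hl with h1 | h1
            · exact Or.inl (h1 ▸ hx (h1 ▸ hr))
            · exact Or.inr ⟨h1, hr⟩

-- componentwise split of a fold over pairs
lemma pvFoldl_prod {α β γ : Type} (f : β → α → β) (g : γ → α → γ) (l : List α) (st : β × γ) :
    l.foldl (fun st a => (f st.1 a, g st.2 a)) st = (l.foldl f st.1, l.foldl g st.2) := by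
  induction l generalizing st with
  | nil => rfl
  | cons a l ih => rw [List.foldl_cons, List.foldl_cons, List.foldl_cons, ih]

lemma pvFoldl_if_filter {α σ : Type} (c : α → Bool) (g : σ → α → σ) :
    ∀ (l : List α) (v : σ),
      l.foldl (fun v a => if c a then g v a else v) v = (l.filter c).foldl g v := by
  intro l
  induction l with
  | nil => intro v; rfl
  | cons a l ih =>
    intro v
    rw [List.foldl_cons, List.filter_cons]
    by_cases hc : c a
    · rw [if_pos hc, if_pos hc, List.foldl_cons, ih]
    · rw [if_neg hc, if_neg hc, ih]

lemma pvInitB_eq (grid : List (List String)) (R C : Int) :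
    pvInitB grid R C
      = (pvCellsOf grid R C "X", PySem.Set.ofList (pvCellsOf grid R C "X")) := by
  unfold pvInitB pvCellsOf
  have hrow : ∀ i (st : List (Int × Int) × PySem.Set (Int × Int)),
      (PySem.List.pyRange 0 C 1).foldl (fun st j =>
        if pvCell grid i j == "X" then (st.1 ++ [(i, j)], PySem.Set.add st.2 (i, j))
        else st) st
      = (st.1 ++ ((PySem.List.pyRange 0 C 1).filter (fun j => pvCell grid i j == "X")).map
            (fun j => (i, j)),
         (((PySem.List.pyRange 0 C 1).filter (fun j => pvCell grid i j == "X")).map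
            (fun j => (i, j))).foldl PySem.Set.add st.2) := by
    intro i st
    have hbody : (fun (st : List (Int × Int) × PySem.Set (Int × Int)) j =>
        if pvCell grid i j == "X" then (st.1 ++ [(i, j)], PySem.Set.add st.2 (i, j)) else st)
      = fun st j => ((if pvCell grid i j == "X" then st.1 ++ [(i, j)] else st.1),
          (if pvCell grid i j == "X" then PySem.Set.add st.2 (i, j) else st.2)) := by
      funext st j
      split <;> rfl
    rw [hbody, pvFoldl_prod
      (fun (acc : List (Int × Int)) j =>
        if (pvCell grid i j == "X") = true then acc ++ [((i, j) : Int × Int)] else acc)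
      (fun (v : PySem.Set (Int × Int)) j =>
        if (pvCell grid i j == "X") = true then PySem.Set.add v (i, j) else v)]
    congr 1
    · rw [PySem.List.foldl_append_if (fun j => pvCell grid i j == "X")
        (fun j => ((i, j) : Int × Int))]
    · rw [pvFoldl_if_filter (fun j => pvCell grid i j == "X")
        (fun v j => PySem.Set.add v (i, j)), List.foldl_map]
  have hout : (fun (st : List (Int × Int) × PySem.Set (Int × Int)) i =>
      (PySem.List.pyRange 0 C 1).foldl (fun st j =>
        if pvCell grid i j == "X" then (st.1 ++ [(i, j)], PySem.Set.add st.2 (i, j))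
        else st) st)
    = fun st i =>
      (st.1 ++ ((PySem.List.pyRange 0 C 1).filter (fun j => pvCell grid i j == "X")).map
          (fun j => (i, j)),
       (((PySem.List.pyRange 0 C 1).filter (fun j => pvCell grid i j == "X")).map
          (fun j => (i, j))).foldl PySem.Set.add st.2) := by
    funext st i
    exact hrow i st
  rw [hout, pvFoldl_prod
    (fun (acc : List (Int × Int)) i =>
      acc ++ ((PySem.List.pyRange 0 C 1).filter (fun j => pvCell grid i j == "X")).map
          (fun j => ((i, j) : Int × Int)))
    (fun (v : PySem.Set (Int × Int)) i =>
      (((PySem.List.pyRange 0 C 1).filter (fun j => pvCell grid i j == "X")).map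
          (fun j => ((i, j) : Int × Int))).foldl PySem.Set.add v)]
  congr 1
  · rw [PySem.List.foldl_append_eq_flatMap]
    rfl
  · rw [PySem.Set.ofList_eq_foldl, List.foldl_flatMap]
    rfl

theorem pvLoopB_char (grid : List (List String)) (R C : Int)
    (hxs : pvCellsOf grid R C "X" ≠ []) :
    ∀ (F : List (Int × Int)) (V : PySem.Set (Int × Int)) (d : Int) (k : Nat), d = (k : Int) →
      (∀ q, q ∈ F ↔ pvRect R C q ∧ pvMdist (pvCellsOf grid R C "X") q = k) →
      (∀ q, q ∈ V ↔ pvRect R C q ∧ pvMdist (pvCellsOf grid R C "X") q ≤ k) →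
      (∀ y ∈ pvCellsOf grid R C "Y", k ≤ pvMdist (pvCellsOf grid R C "X") y) →
      pvLoopB grid R C F V d = pvAns (pvCellsOf grid R C "X") (pvCellsOf grid R C "Y") := by
  have hsub : ∀ s ∈ pvCellsOf grid R C "X", pvRect R C s :=
    fun s hs => ((pvMem_cellsOf grid R C "X" s).1 hs).1
  intro F V d
  fun_induction pvLoopB grid R C F V d with
  | case1 F V d hemp =>
    intro k hdk hF hV hY
    have hFnil : F = [] := by simpa [List.isEmpty_iff] using hemp
    subst hFnil
    rcases hys : pvCellsOf grid R C "Y" with _ | ⟨y, ys'⟩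
    · simp [pvAns]
    · exfalso
      have hy : y ∈ pvCellsOf grid R C "Y" := by rw [hys]; exact List.mem_cons.2 (Or.inl rfl)
      have hrect := ((pvMem_cellsOf grid R C "Y" y).1 hy).1
      obtain ⟨p, hp, hpd⟩ := pvReach hxs hsub (pvMdist (pvCellsOf grid R C "X") y) y hrect rfl
        k (hY y hy)
      exact List.not_mem_nil ((hF p).2 ⟨hp, hpd⟩)
  | case2 F V d hemp hany =>
    intro k hdk hF hV hY
    obtain ⟨q, hqF, hqY⟩ := List.any_eq_true.1 hany
    obtain ⟨hqr, hqd⟩ := (hF q).1 hqF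
    have hqys : q ∈ pvCellsOf grid R C "Y" :=
      (pvMem_cellsOf grid R C "Y" q).2 ⟨hqr, beq_iff_eq.1 hqY⟩
    obtain ⟨s, hsx, hsq⟩ := pvMdist_exists hxs q
    set L := (pvCellsOf grid R C "X").flatMap (fun x => (pvCellsOf grid R C "Y").map (fun y =>
        (((x.1 - y.1).natAbs : Int) + ((x.2 - y.2).natAbs : Int)))) with hLdef
    have hkL : ((k : Nat) : Int) ∈ L := by
      refine List.mem_flatMap.2 ⟨s, hsx, List.mem_map.2 ⟨q, hqys, ?_⟩⟩
      have : (q.1 - s.1).natAbs + (q.2 - s.2).natAbs = k := by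
        have : pvMan q s = k := by omega
        unfold pvMan at this; omega
      omega
    have hlb : ∀ z ∈ L, (k : Int) ≤ z := by
      intro z hz
      obtain ⟨x, hx, hz2⟩ := List.mem_flatMap.1 hz
      obtain ⟨y, hy, rfl⟩ := List.mem_map.1 hz2
      have h1 : pvMdist (pvCellsOf grid R C "X") y ≤ pvMan y x := pvMdist_le y hx
      have h2 := hY y hy
      unfold pvMan at h1
      omega
    cases hmin : PySem.List.min? L (fun v => v) with
    | none =>
      exact absurd ((PySem.List.min?_eq_none_iff L (fun v => v)).1 hmin)
        (List.ne_nil_of_mem hkL)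
    | some m =>
      have hm2 := PySem.List.min?_isMin hmin ((k : Nat) : Int) hkL
      have hm3 := hlb m (PySem.List.min?_mem hmin)
      have hmk : m = ((k : Nat) : Int) := le_antisymm hm2 hm3
      rw [pvAns, if_neg (by
        simp only [List.isEmpty_iff, not_or]
        exact ⟨hxs, List.ne_nil_of_mem hqys⟩), ← hLdef, hmin, hmk, hdk]
  | case3 F V d hemp hany st ih =>
    intro k hdk hF hV hY
    have hst : st = F.foldl (fun st p => (pvNbrs p).foldl (pvStepB R C) st) ([], V) :=
      List.foldl_attach (f := fun st p => List.foldl (pvStepB R C) st (pvNbrs p))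
    have hst2 : st = (F.flatMap pvNbrs).foldl (pvStepB R C) ([], V) :=
      hst.trans (List.foldl_flatMap).symm
    have hmem := pvStepB_foldl_mem R C (F.flatMap pvNbrs) [] V (by simp)
    have hnoY : ∀ q ∈ F, pvCell grid q.1 q.2 ≠ "Y" := by
      intro q hq hcell
      exact hany (List.any_eq_true.2 ⟨q, hq, beq_iff_eq.2 hcell⟩)
    have hY' : ∀ y ∈ pvCellsOf grid R C "Y", k + 1 ≤ pvMdist (pvCellsOf grid R C "X") y := by
      intro y hy
      have hky := hY y hy
      obtain ⟨hyr, hyc⟩ := (pvMem_cellsOf grid R C "Y" y).1 hy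
      by_cases hdy : pvMdist (pvCellsOf grid R C "X") y = k
      · exact absurd hyc (hnoY y ((hF y).2 ⟨hyr, hdy⟩))
      · omega
    have hF' : ∀ q, q ∈ st.1 ↔ pvRect R C q ∧ pvMdist (pvCellsOf grid R C "X") q = k + 1 := by
      intro q
      rw [hst2, (hmem q).1]
      simp only [List.not_mem_nil, false_or]
      constructor
      · rintro ⟨hql, hqr, hqnv⟩
        obtain ⟨p, hpF, hpn⟩ := List.mem_flatMap.1 hql
        obtain ⟨hpr, hpd⟩ := (hF p).1 hpF
        have h1 : pvMdist (pvCellsOf grid R C "X") q ≤ k + 1 := by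
          have := pvMdist_nbr hxs hpn
          omega
        have h2 : ¬ pvMdist (pvCellsOf grid R C "X") q ≤ k := fun hh => hqnv ((hV q).2 ⟨hqr, hh⟩)
        exact ⟨hqr, by omega⟩
      · rintro ⟨hqr, hqd⟩
        obtain ⟨p, hpr, hpn, hpd⟩ := pvDescend hxs hsub hqr hqd
        refine ⟨List.mem_flatMap.2 ⟨p, (hF p).2 ⟨hpr, hpd⟩, hpn⟩, hqr, ?_⟩
        intro hv
        have := ((hV q).1 hv).2
        omega
    have hV' : ∀ q, q ∈ st.2 ↔ pvRect R C q ∧ pvMdist (pvCellsOf grid R C "X") q ≤ k + 1 := by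
      intro q
      rw [hst2, (hmem q).2]
      constructor
      · rintro (hv | ⟨hql, hqr⟩)
        · obtain ⟨hqr, hqd⟩ := (hV q).1 hv
          exact ⟨hqr, by omega⟩
        · obtain ⟨p, hpF, hpn⟩ := List.mem_flatMap.1 hql
          obtain ⟨hpr, hpd⟩ := (hF p).1 hpF
          have := pvMdist_nbr hxs hpn
          exact ⟨hqr, by omega⟩
      · rintro ⟨hqr, hqd⟩
        by_cases hle : pvMdist (pvCellsOf grid R C "X") q ≤ k
        · exact Or.inl ((hV q).2 ⟨hqr, hle⟩)
        · have hqd' : pvMdist (pvCellsOf grid R C "X") q = k + 1 := by omega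
          obtain ⟨p, hpr, hpn, hpd⟩ := pvDescend hxs hsub hqr hqd'
          exact Or.inr ⟨List.mem_flatMap.2 ⟨p, (hF p).2 ⟨hpr, hpd⟩, hpn⟩, hqr⟩
    have hres := ih (k + 1) (by omega) hF' hV' hY'
    rw [hst] at hres
    exact hres

-- ===== VERDICT (by name: the statement is the Claim_ definition above) =====
theorem bfs_spec : Claim_equal_bfs := by
  intro grid _ _
  unfold Spec_bfs bfs bfs_alt
  have hcols : (if grid.isEmpty then (0 : Int)
      else PySem.List.len (PySem.List.pyGetD grid 0 []))
      = PySem.List.len (PySem.List.pyGetD grid 0 []) := by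
    cases grid with
    | nil => simp [PySem.List.pyGetD, PySem.List.len]
    | cons r g => simp
  rw [hcols, pvInit_rel, pvMain, pvInitB_eq]
  set R := PySem.List.len grid with hR
  set C := PySem.List.len (PySem.List.pyGetD grid 0 []) with hC
  by_cases hxs : pvCellsOf grid R C "X" = []
  · rw [hxs, pvLoopB]
    simp [pvAns, hxs]
  · refine pvLoopB_char grid R C hxs (pvCellsOf grid R C "X")
      (PySem.Set.ofList (pvCellsOf grid R C "X")) 0 0 (by simp) ?_ ?_ ?_
    · intro q
      constructor
      · intro hq
        obtain ⟨hr, _⟩ := (pvMem_cellsOf grid R C "X" q).1 hq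
        exact ⟨hr, (pvMdist_zero hxs q).2 hq⟩
      · rintro ⟨_, h0⟩
        exact (pvMdist_zero hxs q).1 h0
    · intro q
      rw [PySem.Set.mem_ofList]
      constructor
      · intro hq
        obtain ⟨hr, _⟩ := (pvMem_cellsOf grid R C "X" q).1 hq
        exact ⟨hr, Nat.le_of_eq ((pvMdist_zero hxs q).2 hq)⟩
      · rintro ⟨_, hle⟩
        exact (pvMdist_zero hxs q).1 (Nat.le_zero.1 hle)
    · intro y _
      exact Nat.zero_le _
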